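-- pv_equiv track=rewrite | github.com/pypi-data/pypi-mirror-16 | packages/GTsegments/GTsegments-0.21.tar.gz/GTsegments-0.21/src/gtsegments/DCC_listing.py | follow_the_strand
-- ===== SOURCE A (Python) =====
-- def follow_the_strand(gene_list, chromosome, start_pos, end_pos):
--     if (start_pos <= end_pos):
--         return sorted(gene_list)
--     else:
--         result = []
--         # TODO: find a way to used sorting key with circular list...
--         for x in range(start_pos,len(chromosome)):
--             if x in gene_list:
--                 result.append(x)
--         for x in range(0, end_pos + 1):
--             if x in gene_list:
--                 result.append(x)
--         return result
-- ===== SOURCE B (Python) =====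
-- def follow_the_strand(gene_list, chromosome, start_pos, end_pos):
--     if start_pos <= end_pos:
--         return sorted(gene_list)
--     s = sorted(set(gene_list))
--     n = len(chromosome)
--     return [x for x in s if start_pos <= x < n] + [x for x in s if 0 <= x <= end_pos]
-- ===== Notes on version B (the rewrite author's own statement) =====
-- stated objective: faster
-- what changed: Instead of scanning every position of the two circular ranges and testing membership in gene_list (O(range * m)), B sorts the deduplicated gene_list once and filters that sorted list against the two interval bounds.
import Mathlib
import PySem

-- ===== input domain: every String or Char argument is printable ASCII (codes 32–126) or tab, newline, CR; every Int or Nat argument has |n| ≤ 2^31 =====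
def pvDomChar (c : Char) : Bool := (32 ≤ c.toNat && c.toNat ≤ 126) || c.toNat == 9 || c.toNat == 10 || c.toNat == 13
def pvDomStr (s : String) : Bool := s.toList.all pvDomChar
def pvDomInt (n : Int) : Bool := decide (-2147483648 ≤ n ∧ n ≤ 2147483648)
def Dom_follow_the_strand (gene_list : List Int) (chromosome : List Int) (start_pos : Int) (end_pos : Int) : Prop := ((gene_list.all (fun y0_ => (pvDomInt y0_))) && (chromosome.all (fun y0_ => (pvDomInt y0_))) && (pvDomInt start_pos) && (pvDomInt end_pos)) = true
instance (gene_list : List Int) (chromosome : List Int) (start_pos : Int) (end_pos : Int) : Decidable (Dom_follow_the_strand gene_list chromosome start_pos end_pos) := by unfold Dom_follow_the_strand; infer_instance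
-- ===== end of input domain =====

-- B replaces A's position-by-position scan of the two circular ranges (membership test per
-- position) by sorting the deduplicated gene list once and filtering it against the interval
-- bounds; objective: faster (asymptotic).

-- ===== PORT A =====
def follow_the_strand (gene_list : List Int) (chromosome : List Int) (start_pos : Int) (end_pos : Int) : List Int :=
  if start_pos ≤ end_pos then
    PySem.List.sorted gene_list (fun x => x) false
  else
    let result : List Int :=
      (PySem.List.pyRange start_pos (chromosome.length : Int) 1).foldl
        (fun acc x => if x ∈ gene_list then acc ++ [x] else acc) []
    (PySem.List.pyRange 0 (end_pos + 1) 1).foldl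
      (fun acc x => if x ∈ gene_list then acc ++ [x] else acc) result

-- ===== PORT B =====
def follow_the_strand_alt (gene_list : List Int) (chromosome : List Int) (start_pos : Int) (end_pos : Int) : List Int :=
  if start_pos ≤ end_pos then
    PySem.List.sorted gene_list (fun x => x) false
  else
    let s := PySem.List.sorted (PySem.Set.ofList gene_list) (fun x => x) false
    let n : Int := chromosome.length
    s.filter (fun x => decide (start_pos ≤ x) && decide (x < n))
      ++ s.filter (fun x => decide (0 ≤ x) && decide (x ≤ end_pos))

-- ===== PRECONDITION & SPEC =====
def Spec_follow_the_strand (gene_list : List Int) (chromosome : List Int) (start_pos : Int) (end_pos : Int) (out : List Int) : Prop := out = follow_the_strand_alt gene_list chromosome start_pos end_pos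
instance (gene_list : List Int) (chromosome : List Int) (start_pos : Int) (end_pos : Int) (out : List Int) : Decidable (Spec_follow_the_strand gene_list chromosome start_pos end_pos out) := by unfold Spec_follow_the_strand; infer_instance

-- ===== CLAIM (what is proved, stated in full; the proofs are below) =====
def Claim_equal_follow_the_strand : Prop := ∀ (gene_list : List Int) (chromosome : List Int) (start_pos : Int) (end_pos : Int), Dom_follow_the_strand gene_list chromosome start_pos end_pos → Spec_follow_the_strand gene_list chromosome start_pos end_pos (follow_the_strand gene_list chromosome start_pos end_pos)

-- ===== LEMMAS AND PROOFS =====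

-- Two strictly increasing integer lists with the same members are equal.
theorem pv_pairwise_lt_ext {l₁ l₂ : List Int} (h₁ : l₁.Pairwise (· < ·))
    (h₂ : l₂.Pairwise (· < ·)) (hm : ∀ x, x ∈ l₁ ↔ x ∈ l₂) : l₁ = l₂ := by
  have n₁ : l₁.Nodup := h₁.imp (fun h => ne_of_lt h)
  have n₂ : l₂.Nodup := h₂.imp (fun h => ne_of_lt h)
  exact ((List.perm_ext_iff_of_nodup n₁ n₂).mpr hm).eq_of_pairwise
    (fun a b _ _ hab hba => absurd hba (lt_asymm hab)) h₁ h₂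

-- A's scan of range(a,b) testing membership in gl equals B's filter of sorted(set(gl)).
theorem pv_range_filter_eq (gl : List Int) (a b : Int) :
    (PySem.List.pyRange a b 1).filter (fun x => decide (x ∈ gl))
      = (PySem.List.sorted (PySem.Set.ofList gl) (fun x => x) false).filter
          (fun x => decide (a ≤ x) && decide (x < b)) := by
  apply pv_pairwise_lt_ext
  · exact (PySem.List.pairwise_lt_pyRange_one a b).filter _
  · exact (PySem.List.sorted_ofList_pairwise_lt gl).filter _
  · intro x
    simp [List.mem_filter, PySem.List.mem_pyRange_one, PySem.List.mem_sorted,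
      PySem.Set.mem_ofList]
    tauto

-- ===== VERDICT (by name: the statement is the Claim_ definition above) =====
theorem follow_the_strand_spec : Claim_equal_follow_the_strand := by
  intro gl ch sp ep _
  unfold Spec_follow_the_strand follow_the_strand follow_the_strand_alt
  by_cases h : sp ≤ ep
  · simp [h]
  · simp only [h, if_false]
    rw [PySem.List.foldl_append_ite_eq_filter, PySem.List.foldl_append_ite_eq_filter]
    rw [List.nil_append, pv_range_filter_eq, pv_range_filter_eq]
    congr 1
    apply List.filter_congr
    intro x _
    simp
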